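-- pv_equiv track=rewrite | github.com/aklehm/advent-of-code-2023 | day_1/part2.py | replaceNumberstrings
-- ===== SOURCE A (Python) =====
-- def replaceNumberstrings(numberString: str) -> str:
--     numstr = numberString
--     result = ''
--     strings = {'one': '1', 'two': '2', 'three': '3', 'four': '4', 'five': '5', 'six': '6', 'seven': '7', 'eight': '8', 'nine': '9'}
--
--     for i in range(len(numberString)):
--         a = numstr[i:]
--         if a[0].isnumeric():
--             result = result + a[0]
--         for b in strings.keys():
--             if a.startswith(b):
--                 result = result + strings[b]
--     return result
-- ===== SOURCE B (Python) =====
-- def replaceNumberstrings(numberString: str) -> str: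
--     words = {'one': '1', 'two': '2', 'three': '3', 'four': '4', 'five': '5',
--              'six': '6', 'seven': '7', 'eight': '8', 'nine': '9'}
--     # position-indexed mark table: at most one digit can originate at each index
--     marks = [c if c.isnumeric() else None for c in numberString]
--     for w, d in words.items():
--         for i in range(len(numberString) - len(w) + 1):
--             if numberString[i:i + len(w)] == w:
--                 marks[i] = d
--     return ''.join(m for m in marks if m is not None)
-- ===== Notes on version B (the rewrite author's own statement) =====
-- stated objective: faster
-- what changed: Instead of copying the suffix numberString[i:] at every position and testing all nine words against it, B builds a position-indexed mark table once (digits in one comprehension pass, then one bounded scan per word) and joins the marks, removing the quadratic per-position suffix copies.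
import Mathlib
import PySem

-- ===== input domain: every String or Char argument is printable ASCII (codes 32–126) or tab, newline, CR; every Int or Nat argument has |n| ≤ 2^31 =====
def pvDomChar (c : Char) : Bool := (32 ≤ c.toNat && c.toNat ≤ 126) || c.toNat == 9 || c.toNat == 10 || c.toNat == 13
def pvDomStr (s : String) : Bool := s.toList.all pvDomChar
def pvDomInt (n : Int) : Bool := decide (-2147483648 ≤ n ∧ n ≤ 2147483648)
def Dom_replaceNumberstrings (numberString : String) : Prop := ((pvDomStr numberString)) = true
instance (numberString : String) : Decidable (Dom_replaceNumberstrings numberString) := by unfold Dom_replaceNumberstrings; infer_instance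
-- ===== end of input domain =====

-- B replaces A's per-position suffix copies (numberString[i:] at every i, each scanned against all nine words)
-- by a position-indexed mark table filled in one digit pass plus one bounded scan per word; on the admitted
-- printable-ASCII domain `isnumeric` coincides with the ASCII digit test used here.

-- ===== PORT A =====
-- the word→digit dict (A's `strings` and B's `words` are the same literal dict; values are the digit characters)
def stringsA : List (List Char × Char) := [(['o','n','e'],'1'), (['t','w','o'],'2'), (['t','h','r','e','e'],'3'), (['f','o','u','r'],'4'), (['f','i','v','e'],'5'), (['s','i','x'],'6'), (['s','e','v','e','n'],'7'), (['e','i','g','h','t'],'8'), (['n','i','n','e'],'9')]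

-- literal port of A; `.isnumeric()` is ported as the ASCII digit test (exact on the ASCII domain);
-- the `none` branch of `a[0]` is unreachable (i < len), Python raises nowhere.
def replaceNumberstrings (numberString : String) : String :=
  let numstr := numberString.toList
  let result : List Char :=
    (PySem.List.pyRange 0 (numstr.length : Int) 1).foldl
      (fun result i =>
        let a := PySem.List.slice numstr (some i) none
        let result :=
          match PySem.List.pyGet? a 0 with
          | some c => if PySem.Chars.isdigit c then result ++ [c] else result
          | none => result
        stringsA.foldl (fun result bv =>
          if PySem.Chars.startswith a bv.1 then result ++ [bv.2] else result) result)
      []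
  String.ofList result

-- ===== PORT B =====

-- literal port of B (Source B): digit marks in one map pass, then per word one scan setting marks[i]
def replaceNumberstrings_alt (numberString : String) : String :=
  let s := numberString.toList
  let marks0 : List (Option Char) :=
    s.map (fun c => if PySem.Chars.isdigit c then some c else none)
  let marks := stringsA.foldl
    (fun marks wd =>
      (PySem.List.pyRange 0 ((s.length : Int) - (wd.1.length : Int) + 1) 1).foldl
        (fun marks i =>
          if PySem.List.slice s (some i) (some (i + (wd.1.length : Int))) = wd.1
          then PySem.List.pySetD marks i (some wd.2) else marks)
        marks)
    marks0
  String.ofList (marks.filterMap id)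

-- ===== PRECONDITION & SPEC =====
def Spec_replaceNumberstrings (numberString : String) (out : String) : Prop := out = replaceNumberstrings_alt numberString
instance (numberString : String) (out : String) : Decidable (Spec_replaceNumberstrings numberString out) := by unfold Spec_replaceNumberstrings; infer_instance

-- ===== CLAIM (what is proved, stated in full; the proofs are below) =====
def Claim_equal_replaceNumberstrings : Prop := ∀ (numberString : String), Dom_replaceNumberstrings numberString → Spec_replaceNumberstrings numberString (replaceNumberstrings numberString)

-- ===== LEMMAS AND PROOFS =====

-- what both programs emit for position j of s
def contrib (s : List Char) (j : Nat) : List Char :=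
  (match s[j]? with
   | some c => if PySem.Chars.isdigit c then [c] else []
   | none => [])
  ++ (stringsA.filter (fun bv => PySem.Chars.startswith (s.drop j) bv.1)).map (·.2)

lemma A_eq (ns : String) :
    replaceNumberstrings ns
      = String.ofList ((List.range ns.toList.length).flatMap (contrib ns.toList)) := by
  dsimp only [replaceNumberstrings]
  rw [PySem.List.pyRange_zero_nat, List.foldl_map]
  rw [PySem.List.foldl_congr_mem (List.range ns.toList.length) _
      (fun acc k => acc ++ contrib ns.toList k) [] ?_]
  · rw [PySem.List.foldl_append_eq_flatMap, List.nil_append]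
  · intro acc k hk
    rw [List.mem_range] at hk
    simp only [PySem.List.slice_from_natCast]
    rw [PySem.List.foldl_append_if (fun bv => PySem.Chars.startswith (ns.toList.drop k) bv.1)
        (fun bv => bv.2) stringsA]
    have hget : PySem.List.pyGet? (ns.toList.drop k) 0 = ns.toList[k]? := by
      rw [← List.head?_drop]
      simp [PySem.List.pyGet?, PySem.List.pyIdx?, show k < ns.length from by simpa using hk]
    rw [hget]
    unfold contrib
    cases hsk : ns.toList[k]? with
    | none => simp
    | some c =>
        by_cases hdig : PySem.Chars.isdigit c = true
        · simp [hdig]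
        · simp [hdig]

-- two startswith-exclusion helpers
lemma sw_excl {v w l : List Char} (h1 : ¬ v <+: w) (h2 : ¬ w <+: v)
    (hv : PySem.Chars.startswith l v = true) : PySem.Chars.startswith l w = false := by
  cases hb : PySem.Chars.startswith l w with
  | false => rfl
  | true =>
      exact (((List.prefix_or_prefix_of_prefix ((PySem.Chars.startswith_iff l v).mp hv)
        ((PySem.Chars.startswith_iff l w).mp hb)).elim h1 h2)).elim

lemma sw_digit {c w0 : Char} {t' w' : List Char} (hne : PySem.Chars.isdigit w0 = false)
    (hd : PySem.Chars.isdigit c = true) :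
    PySem.Chars.startswith (c::t') (w0::w') = false := by
  cases hb : PySem.Chars.startswith (c::t') (w0::w') with
  | false => rfl
  | true =>
      have := (List.cons_prefix_cons.mp ((PySem.Chars.startswith_iff _ _).mp hb)).1
      subst this; rw [hne] at hd; exact absurd hd (by simp)

-- at each position at most one of the ten tests fires, so last-write-wins equals append-all
lemma key (c : Char) (t' : List Char) :
    (stringsA.foldl (fun o wd => if PySem.Chars.startswith (c::t') wd.1 = true then some wd.2 else o)
       (if PySem.Chars.isdigit c then some c else none)).toList
    = (if PySem.Chars.isdigit c then [c] else [])
      ++ (stringsA.filter (fun bv => PySem.Chars.startswith (c::t') bv.1)).map (·.2) := by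
  by_cases hd : PySem.Chars.isdigit c = true
  · have e0 : PySem.Chars.startswith (c::t') ['o','n','e'] = false := sw_digit (by decide) hd; have e1 : PySem.Chars.startswith (c::t') ['t','w','o'] = false := sw_digit (by decide) hd; have e2 : PySem.Chars.startswith (c::t') ['t','h','r','e','e'] = false := sw_digit (by decide) hd; have e3 : PySem.Chars.startswith (c::t') ['f','o','u','r'] = false := sw_digit (by decide) hd; have e4 : PySem.Chars.startswith (c::t') ['f','i','v','e'] = false := sw_digit (by decide) hd; have e5 : PySem.Chars.startswith (c::t') ['s','i','x'] = false := sw_digit (by decide) hd; have e6 : PySem.Chars.startswith (c::t') ['s','e','v','e','n'] = false := sw_digit (by decide) hd; have e7 : PySem.Chars.startswith (c::t') ['e','i','g','h','t'] = false := sw_digit (by decide) hd; have e8 : PySem.Chars.startswith (c::t') ['n','i','n','e'] = false := sw_digit (by decide) hd;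
    simp [stringsA, List.foldl, List.filter, hd, e0, e1, e2, e3, e4, e5, e6, e7, e8]
  · have hd0 : PySem.Chars.isdigit c = false := by revert hd; cases PySem.Chars.isdigit c <;> simp
    by_cases h0 : PySem.Chars.startswith (c::t') ['o','n','e'] = true
    · have f1 : PySem.Chars.startswith (c::t') ['t','w','o'] = false := sw_excl (by decide) (by decide) h0; have f2 : PySem.Chars.startswith (c::t') ['t','h','r','e','e'] = false := sw_excl (by decide) (by decide) h0; have f3 : PySem.Chars.startswith (c::t') ['f','o','u','r'] = false := sw_excl (by decide) (by decide) h0; have f4 : PySem.Chars.startswith (c::t') ['f','i','v','e'] = false := sw_excl (by decide) (by decide) h0; have f5 : PySem.Chars.startswith (c::t') ['s','i','x'] = false := sw_excl (by decide) (by decide) h0; have f6 : PySem.Chars.startswith (c::t') ['s','e','v','e','n'] = false := sw_excl (by decide) (by decide) h0; have f7 : PySem.Chars.startswith (c::t') ['e','i','g','h','t'] = false := sw_excl (by decide) (by decide) h0; have f8 : PySem.Chars.startswith (c::t') ['n','i','n','e'] = false := sw_excl (by decide) (by decide) h0;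
      simp [stringsA, List.foldl, List.filter, hd0, h0, f1, f2, f3, f4, f5, f6, f7, f8]
    ·
      by_cases h1 : PySem.Chars.startswith (c::t') ['t','w','o'] = true
      · have f0 : PySem.Chars.startswith (c::t') ['o','n','e'] = false := sw_excl (by decide) (by decide) h1; have f2 : PySem.Chars.startswith (c::t') ['t','h','r','e','e'] = false := sw_excl (by decide) (by decide) h1; have f3 : PySem.Chars.startswith (c::t') ['f','o','u','r'] = false := sw_excl (by decide) (by decide) h1; have f4 : PySem.Chars.startswith (c::t') ['f','i','v','e'] = false := sw_excl (by decide) (by decide) h1; have f5 : PySem.Chars.startswith (c::t') ['s','i','x'] = false := sw_excl (by decide) (by decide) h1; have f6 : PySem.Chars.startswith (c::t') ['s','e','v','e','n'] = false := sw_excl (by decide) (by decide) h1; have f7 : PySem.Chars.startswith (c::t') ['e','i','g','h','t'] = false := sw_excl (by decide) (by decide) h1; have f8 : PySem.Chars.startswith (c::t') ['n','i','n','e'] = false := sw_excl (by decide) (by decide) h1;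
        simp [stringsA, List.foldl, List.filter, hd0, h1, f0, f2, f3, f4, f5, f6, f7, f8]
      ·
        by_cases h2 : PySem.Chars.startswith (c::t') ['t','h','r','e','e'] = true
        · have f0 : PySem.Chars.startswith (c::t') ['o','n','e'] = false := sw_excl (by decide) (by decide) h2; have f1 : PySem.Chars.startswith (c::t') ['t','w','o'] = false := sw_excl (by decide) (by decide) h2; have f3 : PySem.Chars.startswith (c::t') ['f','o','u','r'] = false := sw_excl (by decide) (by decide) h2; have f4 : PySem.Chars.startswith (c::t') ['f','i','v','e'] = false := sw_excl (by decide) (by decide) h2; have f5 : PySem.Chars.startswith (c::t') ['s','i','x'] = false := sw_excl (by decide) (by decide) h2; have f6 : PySem.Chars.startswith (c::t') ['s','e','v','e','n'] = false := sw_excl (by decide) (by decide) h2; have f7 : PySem.Chars.startswith (c::t') ['e','i','g','h','t'] = false := sw_excl (by decide) (by decide) h2; have f8 : PySem.Chars.startswith (c::t') ['n','i','n','e'] = false := sw_excl (by decide) (by decide) h2;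
          simp [stringsA, List.foldl, List.filter, hd0, h2, f0, f1, f3, f4, f5, f6, f7, f8]
        ·
          by_cases h3 : PySem.Chars.startswith (c::t') ['f','o','u','r'] = true
          · have f0 : PySem.Chars.startswith (c::t') ['o','n','e'] = false := sw_excl (by decide) (by decide) h3; have f1 : PySem.Chars.startswith (c::t') ['t','w','o'] = false := sw_excl (by decide) (by decide) h3; have f2 : PySem.Chars.startswith (c::t') ['t','h','r','e','e'] = false := sw_excl (by decide) (by decide) h3; have f4 : PySem.Chars.startswith (c::t') ['f','i','v','e'] = false := sw_excl (by decide) (by decide) h3; have f5 : PySem.Chars.startswith (c::t') ['s','i','x'] = false := sw_excl (by decide) (by decide) h3; have f6 : PySem.Chars.startswith (c::t') ['s','e','v','e','n'] = false := sw_excl (by decide) (by decide) h3; have f7 : PySem.Chars.startswith (c::t') ['e','i','g','h','t'] = false := sw_excl (by decide) (by decide) h3; have f8 : PySem.Chars.startswith (c::t') ['n','i','n','e'] = false := sw_excl (by decide) (by decide) h3;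
            simp [stringsA, List.foldl, List.filter, hd0, h3, f0, f1, f2, f4, f5, f6, f7, f8]
          ·
            by_cases h4 : PySem.Chars.startswith (c::t') ['f','i','v','e'] = true
            · have f0 : PySem.Chars.startswith (c::t') ['o','n','e'] = false := sw_excl (by decide) (by decide) h4; have f1 : PySem.Chars.startswith (c::t') ['t','w','o'] = false := sw_excl (by decide) (by decide) h4; have f2 : PySem.Chars.startswith (c::t') ['t','h','r','e','e'] = false := sw_excl (by decide) (by decide) h4; have f3 : PySem.Chars.startswith (c::t') ['f','o','u','r'] = false := sw_excl (by decide) (by decide) h4; have f5 : PySem.Chars.startswith (c::t') ['s','i','x'] = false := sw_excl (by decide) (by decide) h4; have f6 : PySem.Chars.startswith (c::t') ['s','e','v','e','n'] = false := sw_excl (by decide) (by decide) h4; have f7 : PySem.Chars.startswith (c::t') ['e','i','g','h','t'] = false := sw_excl (by decide) (by decide) h4; have f8 : PySem.Chars.startswith (c::t') ['n','i','n','e'] = false := sw_excl (by decide) (by decide) h4;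
              simp [stringsA, List.foldl, List.filter, hd0, h4, f0, f1, f2, f3, f5, f6, f7, f8]
            ·
              by_cases h5 : PySem.Chars.startswith (c::t') ['s','i','x'] = true
              · have f0 : PySem.Chars.startswith (c::t') ['o','n','e'] = false := sw_excl (by decide) (by decide) h5; have f1 : PySem.Chars.startswith (c::t') ['t','w','o'] = false := sw_excl (by decide) (by decide) h5; have f2 : PySem.Chars.startswith (c::t') ['t','h','r','e','e'] = false := sw_excl (by decide) (by decide) h5; have f3 : PySem.Chars.startswith (c::t') ['f','o','u','r'] = false := sw_excl (by decide) (by decide) h5; have f4 : PySem.Chars.startswith (c::t') ['f','i','v','e'] = false := sw_excl (by decide) (by decide) h5; have f6 : PySem.Chars.startswith (c::t') ['s','e','v','e','n'] = false := sw_excl (by decide) (by decide) h5; have f7 : PySem.Chars.startswith (c::t') ['e','i','g','h','t'] = false := sw_excl (by decide) (by decide) h5; have f8 : PySem.Chars.startswith (c::t') ['n','i','n','e'] = false := sw_excl (by decide) (by decide) h5;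
                simp [stringsA, List.foldl, List.filter, hd0, h5, f0, f1, f2, f3, f4, f6, f7, f8]
              ·
                by_cases h6 : PySem.Chars.startswith (c::t') ['s','e','v','e','n'] = true
                · have f0 : PySem.Chars.startswith (c::t') ['o','n','e'] = false := sw_excl (by decide) (by decide) h6; have f1 : PySem.Chars.startswith (c::t') ['t','w','o'] = false := sw_excl (by decide) (by decide) h6; have f2 : PySem.Chars.startswith (c::t') ['t','h','r','e','e'] = false := sw_excl (by decide) (by decide) h6; have f3 : PySem.Chars.startswith (c::t') ['f','o','u','r'] = false := sw_excl (by decide) (by decide) h6; have f4 : PySem.Chars.startswith (c::t') ['f','i','v','e'] = false := sw_excl (by decide) (by decide) h6; have f5 : PySem.Chars.startswith (c::t') ['s','i','x'] = false := sw_excl (by decide) (by decide) h6; have f7 : PySem.Chars.startswith (c::t') ['e','i','g','h','t'] = false := sw_excl (by decide) (by decide) h6; have f8 : PySem.Chars.startswith (c::t') ['n','i','n','e'] = false := sw_excl (by decide) (by decide) h6;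
                  simp [stringsA, List.foldl, List.filter, hd0, h6, f0, f1, f2, f3, f4, f5, f7, f8]
                ·
                  by_cases h7 : PySem.Chars.startswith (c::t') ['e','i','g','h','t'] = true
                  · have f0 : PySem.Chars.startswith (c::t') ['o','n','e'] = false := sw_excl (by decide) (by decide) h7; have f1 : PySem.Chars.startswith (c::t') ['t','w','o'] = false := sw_excl (by decide) (by decide) h7; have f2 : PySem.Chars.startswith (c::t') ['t','h','r','e','e'] = false := sw_excl (by decide) (by decide) h7; have f3 : PySem.Chars.startswith (c::t') ['f','o','u','r'] = false := sw_excl (by decide) (by decide) h7; have f4 : PySem.Chars.startswith (c::t') ['f','i','v','e'] = false := sw_excl (by decide) (by decide) h7; have f5 : PySem.Chars.startswith (c::t') ['s','i','x'] = false := sw_excl (by decide) (by decide) h7; have f6 : PySem.Chars.startswith (c::t') ['s','e','v','e','n'] = false := sw_excl (by decide) (by decide) h7; have f8 : PySem.Chars.startswith (c::t') ['n','i','n','e'] = false := sw_excl (by decide) (by decide) h7;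
                    simp [stringsA, List.foldl, List.filter, hd0, h7, f0, f1, f2, f3, f4, f5, f6, f8]
                  ·
                    by_cases h8 : PySem.Chars.startswith (c::t') ['n','i','n','e'] = true
                    · have f0 : PySem.Chars.startswith (c::t') ['o','n','e'] = false := sw_excl (by decide) (by decide) h8; have f1 : PySem.Chars.startswith (c::t') ['t','w','o'] = false := sw_excl (by decide) (by decide) h8; have f2 : PySem.Chars.startswith (c::t') ['t','h','r','e','e'] = false := sw_excl (by decide) (by decide) h8; have f3 : PySem.Chars.startswith (c::t') ['f','o','u','r'] = false := sw_excl (by decide) (by decide) h8; have f4 : PySem.Chars.startswith (c::t') ['f','i','v','e'] = false := sw_excl (by decide) (by decide) h8; have f5 : PySem.Chars.startswith (c::t') ['s','i','x'] = false := sw_excl (by decide) (by decide) h8; have f6 : PySem.Chars.startswith (c::t') ['s','e','v','e','n'] = false := sw_excl (by decide) (by decide) h8; have f7 : PySem.Chars.startswith (c::t') ['e','i','g','h','t'] = false := sw_excl (by decide) (by decide) h8;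
                      simp [stringsA, List.foldl, List.filter, hd0, h8, f0, f1, f2, f3, f4, f5, f6, f7]
                    · simp [stringsA, List.foldl, List.filter, hd0, h0, h1, h2, h3, h4, h5, h6, h7, h8]

lemma inner_len (s w : List Char) (d : Char) :
    ∀ (l : List Int) (m : List (Option Char)),
      (l.foldl (fun marks i =>
          if PySem.List.slice s (some i) (some (i + (w.length : Int))) = w
          then PySem.List.pySetD marks i (some d) else marks) m).length = m.length := by
  intro l
  induction l with
  | nil => intro m; rfl
  | cons i l ih =>
      intro m
      rw [List.foldl_cons, ih]
      split
      · exact PySem.List.length_pySetD _ _ _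
      · rfl

lemma inner_get (s w : List Char) (d : Char) :
    ∀ (t : Nat) (a : Nat) (m : List (Option Char)), m.length = s.length →
      (s.length : Int) - (w.length : Int) + 1 - (a : Int) ≤ (t : Int) →
      ∀ (j : Nat), j < s.length →
      ((PySem.List.pyRange (a : Int) ((s.length : Int) - (w.length : Int) + 1) 1).foldl
        (fun marks i =>
          if PySem.List.slice s (some i) (some (i + (w.length : Int))) = w
          then PySem.List.pySetD marks i (some d) else marks) m)[j]?
      = if a ≤ j ∧ PySem.Chars.startswith (s.drop j) w = true then some (some d) else m[j]? := by
  intro t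
  induction t with
  | zero =>
      intro a m hm hb j hj
      rw [PySem.List.pyRange_one_eq_nil (by omega), List.foldl_nil, if_neg]
      rintro ⟨haj, hsw⟩
      have hl := ((PySem.Chars.startswith_iff _ _).mp hsw).length_le
      simp only [List.length_drop] at hl
      omega
  | succ t ih =>
      intro a m hm hb j hj
      by_cases hab : (a : Int) < (s.length : Int) - (w.length : Int) + 1
      · rw [PySem.List.pyRange_one_cons hab, List.foldl_cons]
        have hcond : (PySem.List.slice s (some (a : Int)) (some ((a : Int) + (w.length : Int))) = w)
            ↔ PySem.Chars.startswith (s.drop a) w = true := by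
          rw [PySem.List.slice_natCast_add s a w.length, PySem.Chars.startswith_iff,
            List.prefix_iff_eq_take]
          exact ⟨fun h => h.symm, fun h => h.symm⟩
        have hstep : (if PySem.List.slice s (some (a : Int)) (some ((a : Int) + (w.length : Int))) = w
            then PySem.List.pySetD m (a : Int) (some d) else m).length = s.length := by
          split
          · rw [PySem.List.length_pySetD]; exact hm
          · exact hm
        have h1 := ih (a + 1)
          (if PySem.List.slice s (some (a : Int)) (some ((a : Int) + (w.length : Int))) = w
            then PySem.List.pySetD m (a : Int) (some d) else m)
          hstep (by push_cast; omega) j hj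
        push_cast at h1
        rw [h1]
        rcases eq_or_ne j a with rfl | hne
        · by_cases hsw : PySem.Chars.startswith (s.drop j) w = true
          · rw [if_neg (fun h => absurd h.1 (by omega)), if_pos (hcond.mpr hsw),
              PySem.List.pySetD_natCast, List.getElem?_set]
            simp [hsw, hm, hj]
          · rw [if_neg (fun h => hsw h.2), if_neg (fun h => hsw (hcond.mp h)),
              if_neg (fun h => hsw h.2)]
        · have hstepj : (if PySem.List.slice s (some (a : Int)) (some ((a : Int) + (w.length : Int))) = w
              then PySem.List.pySetD m (a : Int) (some d) else m)[j]? = m[j]? := by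
            split
            · rw [PySem.List.pySetD_natCast, List.getElem?_set, if_neg (Ne.symm hne)]
            · rfl
          rw [hstepj]
          by_cases hsw : PySem.Chars.startswith (s.drop j) w = true
          · by_cases haj : a ≤ j
            · rw [if_pos ⟨by omega, hsw⟩, if_pos ⟨haj, hsw⟩]
            · rw [if_neg (fun h => haj (Nat.le_of_succ_le h.1)), if_neg (fun h => haj h.1)]
          · rw [if_neg (fun h => hsw h.2), if_neg (fun h => hsw h.2)]
      · rw [PySem.List.pyRange_one_eq_nil (by omega), List.foldl_nil, if_neg]
        rintro ⟨haj, hsw⟩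
        have hl := ((PySem.Chars.startswith_iff _ _).mp hsw).length_le
        simp only [List.length_drop] at hl
        omega

lemma outer_get (s : List Char) :
    ∀ (ws : List (List Char × Char)) (m : List (Option Char)), m.length = s.length →
      ∀ (j : Nat) (x : Option Char), j < s.length → m[j]? = some x →
      (ws.foldl (fun marks wd =>
        (PySem.List.pyRange 0 ((s.length : Int) - (wd.1.length : Int) + 1) 1).foldl
          (fun marks i => if PySem.List.slice s (some i) (some (i + (wd.1.length : Int))) = wd.1
            then PySem.List.pySetD marks i (some wd.2) else marks) marks) m)[j]?
      = some (ws.foldl (fun o wd =>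
          if PySem.Chars.startswith (s.drop j) wd.1 = true then some wd.2 else o) x) := by
  intro ws
  induction ws with
  | nil => intro m hm j x hj hx; simpa using hx
  | cons wd ws ih =>
      intro m hm j x hj hx
      rw [List.foldl_cons, List.foldl_cons]
      have hlen : ((PySem.List.pyRange 0 ((s.length : Int) - (wd.1.length : Int) + 1) 1).foldl
          (fun marks i => if PySem.List.slice s (some i) (some (i + (wd.1.length : Int))) = wd.1
            then PySem.List.pySetD marks i (some wd.2) else marks) m).length = s.length := by
        rw [inner_len]; exact hm
      apply ih _ hlen j _ hj
      have h0 := inner_get s wd.1 wd.2 (s.length + 1) 0 m hm (by push_cast; omega) j hj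
      push_cast at h0
      rw [h0]
      by_cases hsw : PySem.Chars.startswith (s.drop j) wd.1 = true
      · rw [if_pos ⟨Nat.zero_le j, hsw⟩, if_pos hsw]
      · rw [if_neg (fun h => hsw h.2), if_neg hsw, hx]

lemma outer_len (s : List Char) : ∀ (ws : List (List Char × Char)) (m : List (Option Char)),
    (ws.foldl (fun marks wd =>
      (PySem.List.pyRange 0 ((s.length : Int) - (wd.1.length : Int) + 1) 1).foldl
        (fun marks i => if PySem.List.slice s (some i) (some (i + (wd.1.length : Int))) = wd.1
          then PySem.List.pySetD marks i (some wd.2) else marks) marks) m).length = m.length := by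
  intro ws
  induction ws with
  | nil => intro m; rfl
  | cons wd ws ih => intro m; rw [List.foldl_cons, ih, inner_len]

lemma B_eq (ns : String) :
    replaceNumberstrings_alt ns
      = String.ofList ((List.range ns.toList.length).flatMap (contrib ns.toList)) := by
  dsimp only [replaceNumberstrings_alt]
  have hm0 : (ns.toList.map
      (fun c => if PySem.Chars.isdigit c then some c else none)).length = ns.toList.length :=
    List.length_map ..
  have hmarks : (stringsA.foldl (fun marks wd =>
        (PySem.List.pyRange 0 ((ns.toList.length : Int) - (wd.1.length : Int) + 1) 1).foldl
          (fun marks i => if PySem.List.slice ns.toList (some i) (some (i + (wd.1.length : Int))) = wd.1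
            then PySem.List.pySetD marks i (some wd.2) else marks) marks)
        (ns.toList.map (fun c => if PySem.Chars.isdigit c then some c else none)))
      = (List.range ns.toList.length).map (fun j => stringsA.foldl
          (fun o wd => if PySem.Chars.startswith (ns.toList.drop j) wd.1 = true then some wd.2 else o)
          (ns.toList[j]?.bind (fun c => if PySem.Chars.isdigit c then some c else none))) := by
    apply List.ext_getElem?
    intro j
    by_cases hj : j < ns.toList.length
    · rw [outer_get ns.toList stringsA _ hm0 j
          (if PySem.Chars.isdigit ns.toList[j] then some ns.toList[j] else none) hj
          (by rw [List.getElem?_map, List.getElem?_eq_getElem hj]; rfl)]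
      simp only [List.getElem?_map, List.getElem?_range hj, Option.map_some]
      rw [List.getElem?_eq_getElem hj]
      rfl
    · rw [List.getElem?_eq_none (by rw [outer_len, hm0]; omega),
        List.getElem?_eq_none (by simpa using Nat.le_of_not_lt hj)]
  rw [hmarks, List.filterMap_map, List.filterMap_eq_flatMap_toList]
  congr 1
  apply List.flatMap_congr
  intro j hj
  rw [List.mem_range] at hj
  simp only [Function.comp_apply, id_eq]
  unfold contrib
  rw [List.getElem?_eq_getElem hj]
  simp only [Option.bind_some]
  rw [List.drop_eq_getElem_cons hj]
  exact key ns.toList[j] (ns.toList.drop (j + 1))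

-- ===== VERDICT (by name: the statement is the Claim_ definition above) =====
theorem replaceNumberstrings_spec : Claim_equal_replaceNumberstrings := by
  intro ns _
  unfold Spec_replaceNumberstrings
  rw [A_eq, B_eq]
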